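-- pv_equiv track=rewrite | github.com/darkamulet1/refraction | docs/extractor_knowledge/Extractor/vedic_yaml.py | normalize_graha_key_from_json
-- ===== SOURCE A (Python) =====
-- from typing import Any, Dict, List, Optional
--
-- _PLANET_TOKENS = {
--     "Sun": ("sun", "su"),
--     "Moon": ("moon", "mo", "chandra"),
--     "Mars": ("mars", "ma", "kuj"),
--     "Mercury": ("mercury", "me", "budh"),
--     "Jupiter": ("jupiter", "ju", "guru"),
--     "Venus": ("venus", "ve", "shukra"),
--     "Saturn": ("saturn", "sa", "shani"),
--     "Rahu": ("rahu", "raagu", "ra"),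
--     "Ketu": ("ketu", "kethu", "ke"),
-- }
--
-- def normalize_graha_key_from_json(label: Optional[str]) -> Optional[str]:
--     """Normalize PyJHora graha labels (e.g., 'Sun☉', 'Raagu☊') to canonical names."""
--     if not label:
--         return label
--     letters = "".join(ch for ch in label if ch.isalpha()).lower()
--     for canonical, tokens in _PLANET_TOKENS.items():
--         if any(letters.startswith(tok) for tok in tokens):
--             return canonical
--     return label
-- ===== SOURCE B (Python) =====
-- from typing import Optional
--
-- _PLANET_TOKENS = {
--     "Sun": ("sun", "su"),
--     "Moon": ("moon", "mo", "chandra"),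
--     "Mars": ("mars", "ma", "kuj"),
--     "Mercury": ("mercury", "me", "budh"),
--     "Jupiter": ("jupiter", "ju", "guru"),
--     "Venus": ("venus", "ve", "shukra"),
--     "Saturn": ("saturn", "sa", "shani"),
--     "Rahu": ("rahu", "raagu", "ra"),
--     "Ketu": ("ketu", "kethu", "ke"),
-- }
--
-- # Reverse index: token -> canonical planet, built once.
-- _REV = {tok: canonical for canonical, tokens in _PLANET_TOKENS.items() for tok in tokens}
-- _MAX = max(len(k) for k in _REV)
--
--
-- def normalize_graha_key_from_json(label: Optional[str]) -> Optional[str]: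
--     """Normalize PyJHora graha labels (e.g., 'Sun☉', 'Raagu☊') to canonical names."""
--     if not label:
--         return label
--     letters = "".join(ch for ch in label if ch.isalpha()).lower()
--     for i in range(1, min(len(letters), _MAX) + 1):
--         canonical = _REV.get(letters[:i])
--         if canonical is not None:
--             return canonical
--     return label
-- ===== Notes on version B (the rewrite author's own statement) =====
-- stated objective: alternative
-- what changed: Instead of scanning the nine planets and testing every token with startswith, B builds a flat token->planet reverse dict once and probes the prefixes of the letters string (shortest first, capped at the longest key) by dict lookup; equivalence rests on no token being a prefix of another planet's token.
import Mathlib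
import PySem

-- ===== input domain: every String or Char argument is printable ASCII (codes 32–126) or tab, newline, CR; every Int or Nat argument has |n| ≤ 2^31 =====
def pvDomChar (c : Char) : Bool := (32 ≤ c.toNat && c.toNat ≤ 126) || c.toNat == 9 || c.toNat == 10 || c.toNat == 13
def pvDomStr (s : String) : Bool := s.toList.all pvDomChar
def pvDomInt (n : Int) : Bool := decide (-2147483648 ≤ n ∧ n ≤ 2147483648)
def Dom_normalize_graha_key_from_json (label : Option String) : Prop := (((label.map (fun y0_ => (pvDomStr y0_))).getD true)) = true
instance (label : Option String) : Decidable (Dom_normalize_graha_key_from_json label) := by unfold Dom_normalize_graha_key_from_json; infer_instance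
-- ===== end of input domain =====

-- B replaces A's scan over the nine planets by a single flat token→planet reverse dict and
-- probes the prefixes of `letters` shortest-first; return values are identical (no mutation).

-- ===== PORT A =====
-- _PLANET_TOKENS, in dict insertion order
def pvTokens : List (String × List String) :=
  [("Sun", ["sun", "su"]),
   ("Moon", ["moon", "mo", "chandra"]),
   ("Mars", ["mars", "ma", "kuj"]),
   ("Mercury", ["mercury", "me", "budh"]),
   ("Jupiter", ["jupiter", "ju", "guru"]),
   ("Venus", ["venus", "ve", "shukra"]),
   ("Saturn", ["saturn", "sa", "shani"]),
   ("Rahu", ["rahu", "raagu", "ra"]),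
   ("Ketu", ["ketu", "kethu", "ke"])]

-- the for-loop over _PLANET_TOKENS.items() with early return
def pvFindPlanet (tl : List (String × List String)) (letters : List Char) : Option String :=
  match tl with
  | [] => none
  | (canonical, tokens) :: rest =>
      if tokens.any (fun tok => PySem.Chars.startswith letters tok.toList) then some canonical
      else pvFindPlanet rest letters

def normalize_graha_key_from_json (label : Option String) : Option String :=
  match label with
  | none => none
  | some s =>
      if s = "" then some s
      else
        let letters := PySem.Chars.lower (s.toList.filter PySem.Chars.isalpha)
        match pvFindPlanet pvTokens letters with
        | some canonical => some canonical
        | none => some s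

-- ===== PORT B =====
-- _REV: token → canonical, flattened in _PLANET_TOKENS order (keys as code-point lists)
def pvRev : List (List Char × String) :=
  [("sun".toList, "Sun"), ("su".toList, "Sun"),
   ("moon".toList, "Moon"), ("mo".toList, "Moon"), ("chandra".toList, "Moon"),
   ("mars".toList, "Mars"), ("ma".toList, "Mars"), ("kuj".toList, "Mars"),
   ("mercury".toList, "Mercury"), ("me".toList, "Mercury"), ("budh".toList, "Mercury"),
   ("jupiter".toList, "Jupiter"), ("ju".toList, "Jupiter"), ("guru".toList, "Jupiter"),
   ("venus".toList, "Venus"), ("ve".toList, "Venus"), ("shukra".toList, "Venus"),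
   ("saturn".toList, "Saturn"), ("sa".toList, "Saturn"), ("shani".toList, "Saturn"),
   ("rahu".toList, "Rahu"), ("raagu".toList, "Rahu"), ("ra".toList, "Rahu"),
   ("ketu".toList, "Ketu"), ("kethu".toList, "Ketu"), ("ke".toList, "Ketu")]

-- _MAX = max(len(k) for k in _REV)
def pvMaxKeyLen : Nat := ((pvRev.map (fun e => e.1.length)).max?).getD 0

-- _REV.get(p) : first (only) matching key
def pvRevGet (p : List Char) : Option String :=
  (pvRev.find? (fun e => e.1 == p)).map (fun e => e.2)

-- the for-loop over range(1, min(len(letters), _MAX) + 1) with early return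
def pvScanPrefix (letters : List Char) : List Nat → Option String
  | [] => none
  | i :: rest =>
      match pvRevGet (letters.take i) with
      | some canonical => some canonical
      | none => pvScanPrefix letters rest

def normalize_graha_key_from_json_alt (label : Option String) : Option String :=
  match label with
  | none => none
  | some s =>
      if s = "" then some s
      else
        let letters := PySem.Chars.lower (s.toList.filter PySem.Chars.isalpha)
        match pvScanPrefix letters (List.range' 1 (min letters.length pvMaxKeyLen)) with
        | some canonical => some canonical
        | none => some s

-- ===== PRECONDITION & SPEC =====
def Spec_normalize_graha_key_from_json (label : Option String) (out : Option String) : Prop := out = normalize_graha_key_from_json_alt label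
instance (label : Option String) (out : Option String) : Decidable (Spec_normalize_graha_key_from_json label out) := by unfold Spec_normalize_graha_key_from_json; infer_instance

-- ===== CLAIM (what is proved, stated in full; the proofs are below) =====
def Claim_equal_normalize_graha_key_from_json : Prop := ∀ (label : Option String), Dom_normalize_graha_key_from_json label → Spec_normalize_graha_key_from_json label (normalize_graha_key_from_json label)

-- ===== LEMMAS AND PROOFS =====

-- `letters` matches some token
def pvMatchEx (L : List Char) : Prop := ∃ e ∈ pvRev, e.1 <+: L

theorem pvStartswith_iff (L p : List Char) :
    PySem.Chars.startswith L p = true ↔ p <+: L := by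
  simp [PySem.Chars.startswith, List.isPrefixOf_iff_prefix]

theorem pvFindPlanet_none_iff (tl : List (String × List String)) (L : List Char) :
    pvFindPlanet tl L = none ↔ ∀ p ∈ tl, ∀ t ∈ p.2, ¬ (t.toList <+: L) := by
  induction tl with
  | nil => simp [pvFindPlanet]
  | cons hd tlr ih =>
      obtain ⟨c, toks⟩ := hd
      by_cases h : toks.any (fun tok => PySem.Chars.startswith L tok.toList)
      · simp only [pvFindPlanet, h, if_pos]
        simp only [List.any_eq_true, pvStartswith_iff] at h
        obtain ⟨t, ht, hp⟩ := h
        simp only [List.mem_cons]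
        constructor
        · intro hf; cases hf
        · intro hall
          exact absurd hp (hall (c, toks) (Or.inl rfl) t ht)
      · simp only [pvFindPlanet, if_neg h]
        rw [ih]
        simp only [List.any_eq_true, pvStartswith_iff] at h
        push Not at h
        constructor
        · intro hall p hp t ht
          rcases List.mem_cons.mp hp with h1 | h2
          · subst h1; exact h t ht
          · exact hall p h2 t ht
        · intro hall p hp t ht
          exact hall p (List.mem_cons_of_mem _ hp) t ht

theorem pvFindPlanet_some (tl : List (String × List String)) (L : List Char) (c : String)
    (h : pvFindPlanet tl L = some c) :
    ∃ p ∈ tl, p.1 = c ∧ ∃ t ∈ p.2, t.toList <+: L := by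
  induction tl with
  | nil => simp [pvFindPlanet] at h
  | cons hd tlr ih =>
      obtain ⟨cc, toks⟩ := hd
      by_cases hh : toks.any (fun tok => PySem.Chars.startswith L tok.toList)
      · simp only [pvFindPlanet, hh, if_pos] at h
        injection h with h; subst h
        simp only [List.any_eq_true, pvStartswith_iff] at hh
        obtain ⟨t, ht, hp⟩ := hh
        exact ⟨(cc, toks), List.mem_cons_self .., rfl, t, ht, hp⟩
      · simp only [pvFindPlanet, hh, if_neg, Bool.not_eq_true] at h
        obtain ⟨p, hp, h1, h2⟩ := ih h
        exact ⟨p, List.mem_cons_of_mem _ hp, h1, h2⟩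

theorem pvScanPrefix_none_iff (L : List Char) (is : List Nat) :
    pvScanPrefix L is = none ↔ ∀ i ∈ is, pvRevGet (L.take i) = none := by
  induction is with
  | nil => simp [pvScanPrefix]
  | cons i rest ih =>
      cases hg : pvRevGet (L.take i) with
      | none => simp [pvScanPrefix, hg, ih]
      | some c => simp [pvScanPrefix, hg]

theorem pvScanPrefix_some (L : List Char) (is : List Nat) (c : String)
    (h : pvScanPrefix L is = some c) :
    ∃ i ∈ is, pvRevGet (L.take i) = some c := by
  induction is with
  | nil => simp [pvScanPrefix] at h
  | cons i rest ih =>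
      cases hg : pvRevGet (L.take i) with
      | none =>
          simp only [pvScanPrefix, hg] at h
          obtain ⟨j, hj, hjg⟩ := ih h
          exact ⟨j, List.mem_cons_of_mem _ hj, hjg⟩
      | some c' =>
          simp only [pvScanPrefix, hg] at h
          injection h with h; subst h
          exact ⟨i, List.mem_cons_self .., hg⟩

theorem pvRevGet_some (p : List Char) (c : String) (h : pvRevGet p = some c) :
    (p, c) ∈ pvRev := by
  unfold pvRevGet at h
  cases hf : pvRev.find? (fun e => e.1 == p) with
  | none => simp [hf] at h
  | some e =>
      simp only [hf, Option.map_some] at h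
      have hm := List.mem_of_find?_eq_some hf
      have hp := List.find?_some hf
      simp only [beq_iff_eq] at hp
      injection h with h
      have : e = (p, c) := by
        obtain ⟨e1, e2⟩ := e; simp_all
      rwa [this] at hm

theorem pvRevGet_none_iff (p : List Char) :
    pvRevGet p = none ↔ ∀ e ∈ pvRev, e.1 ≠ p := by
  unfold pvRevGet
  simp [List.find?_eq_none]

-- finite facts about the concrete tables
theorem pvFlat_of_tokens : ∀ p ∈ pvTokens, ∀ t ∈ p.2, (t.toList, p.1) ∈ pvRev := by decide
theorem pvTokens_of_flat : ∀ e ∈ pvRev, ∃ p ∈ pvTokens, p.1 = e.2 ∧ ∃ t ∈ p.2, t.toList = e.1 := by decide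
theorem pvUnique : ∀ e1 ∈ pvRev, ∀ e2 ∈ pvRev, e1.1 <+: e2.1 → e1.2 = e2.2 := by decide
theorem pvKeys_ne_nil : ∀ e ∈ pvRev, e.1 ≠ [] := by decide
theorem pvKeys_le_max : ∀ e ∈ pvRev, e.1.length ≤ pvMaxKeyLen := by decide

theorem pvA_none_iff (L : List Char) :
    pvFindPlanet pvTokens L = none ↔ ¬ pvMatchEx L := by
  rw [pvFindPlanet_none_iff]
  constructor
  · rintro hall ⟨e, he, hpre⟩
    obtain ⟨p, hp, _, t, ht, hteq⟩ := pvTokens_of_flat e he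
    exact hall p hp t ht (hteq ▸ hpre)
  · intro hne p hp t ht hpre
    exact hne ⟨(t.toList, p.1), pvFlat_of_tokens p hp t ht, hpre⟩

theorem pvB_none_iff (L : List Char) :
    pvScanPrefix L (List.range' 1 (min L.length pvMaxKeyLen)) = none ↔ ¬ pvMatchEx L := by
  rw [pvScanPrefix_none_iff]
  constructor
  · rintro hall ⟨e, he, hpre⟩
    have hlen : e.1.length ≤ L.length := hpre.length_le
    have hne : e.1 ≠ [] := pvKeys_ne_nil e he
    have h1 : 1 ≤ e.1.length := by
      cases h : e.1 with
      | nil => exact absurd h hne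
      | cons a l => simp
    have hmem : e.1.length ∈ List.range' 1 (min L.length pvMaxKeyLen) := by
      rw [List.mem_range'_1]
      exact ⟨h1, by have := pvKeys_le_max e he; omega⟩
    have htake : L.take e.1.length = e.1 := (List.prefix_iff_eq_take.mp hpre).symm
    have := (pvRevGet_none_iff _).mp (hall _ hmem) e he
    exact this htake.symm
  · intro hne i hi
    rw [pvRevGet_none_iff]
    intro e he heq
    exact hne ⟨e, he, heq ▸ List.take_prefix i L⟩

theorem pvScan_eq (L : List Char) :
    pvFindPlanet pvTokens L = pvScanPrefix L (List.range' 1 (min L.length pvMaxKeyLen)) := by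
  cases hA : pvFindPlanet pvTokens L with
  | none =>
      have := (pvA_none_iff L).mp hA
      exact ((pvB_none_iff L).mpr this).symm
  | some c1 =>
      cases hB : pvScanPrefix L (List.range' 1 (min L.length pvMaxKeyLen)) with
      | none =>
          have hnm := (pvB_none_iff L).mp hB
          obtain ⟨p, hp, _, t, ht, hpre⟩ := pvFindPlanet_some _ _ _ hA
          exact absurd ⟨(t.toList, p.1), pvFlat_of_tokens p hp t ht, hpre⟩ hnm
      | some c2 =>
          obtain ⟨p, hp, hpc, t, ht, hpre1⟩ := pvFindPlanet_some _ _ _ hA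
          obtain ⟨i, _, hig⟩ := pvScanPrefix_some _ _ _ hB
          have he2 := pvRevGet_some _ _ hig
          have hpre2 : L.take i <+: L := List.take_prefix i L
          have he1 : (t.toList, p.1) ∈ pvRev := pvFlat_of_tokens p hp t ht
          have hcmp := List.prefix_or_prefix_of_prefix hpre1 hpre2
          have : p.1 = c2 := by
            rcases hcmp with h | h
            · exact pvUnique (t.toList, p.1) he1 (L.take i, c2) he2 h
            · exact (pvUnique (L.take i, c2) he2 (t.toList, p.1) he1 h).symm
          rw [← hpc, this]

-- ===== VERDICT (by name: the statement is the Claim_ definition above) =====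
theorem normalize_graha_key_from_json_spec : Claim_equal_normalize_graha_key_from_json := by
  intro label _
  unfold Spec_normalize_graha_key_from_json
  cases label with
  | none => rfl
  | some s =>
      unfold normalize_graha_key_from_json normalize_graha_key_from_json_alt
      by_cases hs : s = ""
      · simp [hs]
      · simp only [hs, if_false]
        rw [pvScan_eq]
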